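-- pv_equiv track=rewrite | github.com/EduRibeiro00/CovidForecast-feup-iart | practical_classes/prat_05/utils.py | calc_incompatibilities
-- ===== SOURCE A (Python) =====
-- def calc_incompatibilities(list_registered):
--     """
--     Returns a dict with key "subjectnum1_subjectnum2" and value equal to the number of
--     incompatibilities.
--     """
--     incompatibilities_dict = {}
--
--     for i, subj_students in enumerate(list_registered):
--         for j in range(i + 1, len(list_registered)):
--
--             other_subj_students = list_registered[j]
--             incompatibilities = 0
--
--             for student in subj_students:
--                 if student in other_subj_students:
--                     incompatibilities += 1
--
--             key = str(i) + "_" + str(j)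
--             incompatibilities_dict[key] = incompatibilities
--
--     return incompatibilities_dict
-- ===== SOURCE B (Python) =====
-- def calc_incompatibilities(list_registered):
--     """
--     Returns a dict with key "subjectnum1_subjectnum2" and value equal to the number of
--     incompatibilities.
--     """
--     # one pass: per-subject multiplicity dict (insertion order = first occurrence)
--     counters = []
--     for students in list_registered:
--         c = {}
--         for s in students:
--             c[s] = c.get(s, 0) + 1
--         counters.append(c)
--
--     n = len(list_registered)
--     result = {}
--     for i in range(n):
--         ci = counters[i]
--         for j in range(i + 1, n):
--             shared = 0
--             for v in counters[j]:        # distinct students of subject j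
--                 shared += ci.get(v, 0)   # multiplicity in subject i (0 if absent)
--             result[str(i) + "_" + str(j)] = shared
--     return result
-- ===== Notes on version B (the rewrite author's own statement) =====
-- stated objective: faster
-- what changed: B precomputes one multiplicity dict per subject in a single pass and computes each pair's value by summing, over the distinct students of subject j, their O(1)-looked-up multiplicity in subject i, instead of A's scan of the whole list j for every student of list i.
import Mathlib
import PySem

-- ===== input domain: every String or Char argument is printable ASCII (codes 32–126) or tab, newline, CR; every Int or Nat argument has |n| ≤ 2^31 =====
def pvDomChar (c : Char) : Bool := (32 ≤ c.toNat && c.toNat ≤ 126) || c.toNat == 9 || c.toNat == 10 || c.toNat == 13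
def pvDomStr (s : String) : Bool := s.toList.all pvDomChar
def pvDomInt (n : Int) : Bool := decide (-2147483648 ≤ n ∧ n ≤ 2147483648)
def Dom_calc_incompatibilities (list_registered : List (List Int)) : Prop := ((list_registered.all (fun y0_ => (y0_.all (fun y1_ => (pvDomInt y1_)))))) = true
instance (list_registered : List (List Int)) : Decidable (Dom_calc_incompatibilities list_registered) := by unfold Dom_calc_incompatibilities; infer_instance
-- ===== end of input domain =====

-- B replaces A's per-pair scans of whole student lists by precomputed per-subject
-- multiplicity dicts summed over the distinct students of the second subject (measured faster).


-- ===== PORT A =====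
-- literal port of A: enumerate outer loop, range(i+1, n) inner loop, linear scan of
-- list_registered[j] per student of subj_students; list_registered[j] is always in range
-- (i+1 ≤ j < len), so the total pyGetD is exact here.
def calc_incompatibilities (list_registered : List (List Int)) : List (String × Int) :=
  ((PySem.List.enumerate list_registered 0).foldl (fun d p =>
      (PySem.List.pyRange (p.1 + 1) (list_registered.length : Int) 1).foldl (fun d j =>
        let other_subj_students := PySem.List.pyGetD list_registered j []
        let incompatibilities :=
          p.2.foldl (fun acc student =>
            if student ∈ other_subj_students then acc + 1 else acc) (0 : Int)
        d.insert (PySem.Int.toStr p.1 ++ "_" ++ PySem.Int.toStr j) incompatibilities) d)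
    PySem.Dict.empty).items

-- ===== PORT B =====
-- literal port of Source B: one counting pass building a Dict per subject, then for each pair
-- (i, j) sum, over the keys of counters[j] (the distinct students of j, insertion order),
-- the looked-up multiplicity in counters[i]; indices produced by the ranges are in range.
def calc_incompatibilities_alt (list_registered : List (List Int)) : List (String × Int) :=
  let counters := list_registered.map (fun students =>
    students.foldl (fun c s => c.insert s (c.getD s 0 + 1)) (PySem.Dict.empty : PySem.Dict Int Int))
  let n : Int := list_registered.length
  ((PySem.List.pyRange 0 n 1).foldl (fun d i =>
      let ci := PySem.List.pyGetD counters i PySem.Dict.empty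
      (PySem.List.pyRange (i + 1) n 1).foldl (fun d j =>
        let cj := PySem.List.pyGetD counters j PySem.Dict.empty
        let shared := cj.keys.foldl (fun acc v => acc + ci.getD v 0) (0 : Int)
        d.insert (PySem.Int.toStr i ++ "_" ++ PySem.Int.toStr j) shared) d)
    PySem.Dict.empty).items

-- ===== PRECONDITION & SPEC =====
def Spec_calc_incompatibilities (list_registered : List (List Int)) (out : List (String × Int)) : Prop := out = calc_incompatibilities_alt list_registered
instance (list_registered : List (List Int)) (out : List (String × Int)) : Decidable (Spec_calc_incompatibilities list_registered out) := by unfold Spec_calc_incompatibilities; infer_instance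

-- ===== CLAIM (what is proved, stated in full; the proofs are below) =====
def Claim_equal_calc_incompatibilities : Prop := ∀ (list_registered : List (List Int)), Dom_calc_incompatibilities list_registered → Spec_calc_incompatibilities list_registered (calc_incompatibilities list_registered)

-- ===== LEMMAS AND PROOFS =====

-- indicator sum over a Nodup list
theorem pv_sum_ite_nodup (s : Int) : ∀ (S : List Int), S.Nodup →
    (S.map (fun v => if s = v then (1 : Int) else 0)).sum = (if s ∈ S then (1 : Int) else 0) := by
  intro S
  induction S with
  | nil => simp
  | cons v t ih =>
    intro hnd
    rcases List.nodup_cons.mp hnd with ⟨hv, hnd'⟩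
    by_cases h : s = v
    · subst h
      simp [List.sum_cons, ih hnd', if_neg hv]
    · simp [List.sum_cons, h, ih hnd']

-- A's membership count over li equals B's sum of li-multiplicities over the distinct elements of lj
theorem pv_foldl_mem_shift (lj : List Int) : ∀ (t : List Int) (a : Int),
    t.foldl (fun acc s => if s ∈ lj then acc + 1 else acc) a
      = a + t.foldl (fun acc s => if s ∈ lj then acc + 1 else acc) 0 := by
  intro t
  induction t with
  | nil => simp
  | cons s t ih =>
    intro a
    simp only [List.foldl_cons]
    by_cases h : s ∈ lj
    · simp only [if_pos h]
      rw [ih (a + 1), ih (0 + 1)]; ring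
    · simp only [if_neg h, zero_add]
      exact ih a

theorem pv_value_eq (li lj : List Int) :
    li.foldl (fun acc s => if s ∈ lj then acc + 1 else acc) (0 : Int)
      = ((PySem.Set.ofList lj).map (fun v => ((li.count v : Nat) : Int))).sum := by
  induction li with
  | nil => simp
  | cons s t ih =>
    have hcnt : (fun v => (((s :: t).count v : Nat) : Int))
        = fun v => ((t.count v : Nat) : Int) + (if s = v then (1 : Int) else 0) := by
      funext v
      by_cases h : s = v <;> simp [h]
    simp only [List.foldl_cons]
    rw [pv_foldl_mem_shift, ih, hcnt,
        PySem.List.sum_map_add_int (PySem.Set.ofList lj) _ _,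
        pv_sum_ite_nodup s _ (PySem.Set.nodup_ofList lj)]
    have hmem : (s ∈ PySem.Set.ofList lj) ↔ s ∈ lj := PySem.Set.mem_ofList lj s
    by_cases h : s ∈ lj <;> simp [h, hmem] <;> ring

-- the outer loops build equal dicts, suffix by suffix
theorem pv_outer (xs : List (List Int)) : ∀ (ys : List (List Int)) (m : Nat)
    (d : PySem.Dict String Int), xs.drop m = ys →
    (PySem.List.enumerate ys (m : Int)).foldl (fun d p =>
      (PySem.List.pyRange (p.1 + 1) (xs.length : Int) 1).foldl (fun d j =>
        let other_subj_students := PySem.List.pyGetD xs j []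
        let incompatibilities :=
          p.2.foldl (fun acc student =>
            if student ∈ other_subj_students then acc + 1 else acc) (0 : Int)
        d.insert (PySem.Int.toStr p.1 ++ "_" ++ PySem.Int.toStr j) incompatibilities) d) d
    = (PySem.List.pyRange (m : Int) (xs.length : Int) 1).foldl (fun d i =>
      let ci := PySem.List.pyGetD (xs.map (fun students =>
        students.foldl (fun c s => c.insert s (c.getD s 0 + 1)) (PySem.Dict.empty : PySem.Dict Int Int))) i PySem.Dict.empty
      (PySem.List.pyRange (i + 1) (xs.length : Int) 1).foldl (fun d j =>
        let cj := PySem.List.pyGetD (xs.map (fun students =>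
          students.foldl (fun c s => c.insert s (c.getD s 0 + 1)) (PySem.Dict.empty : PySem.Dict Int Int))) j PySem.Dict.empty
        let shared := cj.keys.foldl (fun acc v => acc + ci.getD v 0) (0 : Int)
        d.insert (PySem.Int.toStr i ++ "_" ++ PySem.Int.toStr j) shared) d) d := by
  intro ys
  induction ys with
  | nil =>
    intro m d hdrop
    have hm : xs.length ≤ m := by
      by_contra h
      have := List.drop_eq_nil_iff.mp hdrop
      omega
    rw [PySem.List.pyRange_one_eq_nil (by exact_mod_cast hm)]
    simp [PySem.List.enumerate]
  | cons y ys ih =>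
    intro m d hdrop
    have hm : m < xs.length := by
      by_contra h
      rw [List.drop_eq_nil_iff.mpr (by omega)] at hdrop
      simp at hdrop
    have hcons := List.drop_eq_getElem_cons (l := xs) hm
    rw [hdrop] at hcons
    have hy : xs[m] = y := (List.cons.injEq _ _ _ _ ▸ hcons).1.symm
    have hdrop' : xs.drop (m + 1) = ys := ((List.cons.injEq _ _ _ _ ▸ hcons).2).symm
    rw [PySem.List.enumerate_cons, PySem.List.pyRange_one_cons (by exact_mod_cast hm)]
    simp only [List.foldl_cons]
    have hstep :
        (PySem.List.pyRange ((m : Int) + 1) (xs.length : Int) 1).foldl (fun d j =>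
          let other_subj_students := PySem.List.pyGetD xs j []
          let incompatibilities :=
            y.foldl (fun acc student =>
              if student ∈ other_subj_students then acc + 1 else acc) (0 : Int)
          d.insert (PySem.Int.toStr (m : Int) ++ "_" ++ PySem.Int.toStr j) incompatibilities) d
        = (PySem.List.pyRange ((m : Int) + 1) (xs.length : Int) 1).foldl (fun d j =>
          let ci := PySem.List.pyGetD (xs.map (fun students =>
            students.foldl (fun c s => c.insert s (c.getD s 0 + 1)) (PySem.Dict.empty : PySem.Dict Int Int))) (m : Int) PySem.Dict.empty
          let cj := PySem.List.pyGetD (xs.map (fun students =>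
            students.foldl (fun c s => c.insert s (c.getD s 0 + 1)) (PySem.Dict.empty : PySem.Dict Int Int))) j PySem.Dict.empty
          let shared := cj.keys.foldl (fun acc v => acc + ci.getD v 0) (0 : Int)
          d.insert (PySem.Int.toStr (m : Int) ++ "_" ++ PySem.Int.toStr j) shared) d := by
      apply PySem.List.foldl_congr_mem
      intro acc j hj
      rcases (PySem.List.mem_pyRange_one).mp hj with ⟨hj1, hj2⟩
      have hj0 : 0 ≤ j := by omega
      have hjlt : j.toNat < xs.length := by omega
      have hmget : PySem.List.pyGetD (xs.map (fun students =>
          students.foldl (fun c s => c.insert s (c.getD s 0 + 1)) (PySem.Dict.empty : PySem.Dict Int Int))) (m : Int) PySem.Dict.empty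
          = y.foldl (fun c s => c.insert s (c.getD s 0 + 1)) (PySem.Dict.empty : PySem.Dict Int Int) := by
        rw [PySem.List.pyGetD_eq_getElem _ _ (by omega) (by simpa using (by exact_mod_cast hm : (m : Int) < (xs.length : Int)))]
        simp [hy]
      have hjget : PySem.List.pyGetD (xs.map (fun students =>
          students.foldl (fun c s => c.insert s (c.getD s 0 + 1)) (PySem.Dict.empty : PySem.Dict Int Int))) j PySem.Dict.empty
          = (PySem.List.pyGetD xs j []).foldl (fun c s => c.insert s (c.getD s 0 + 1)) (PySem.Dict.empty : PySem.Dict Int Int) := by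
        rw [PySem.List.pyGetD_eq_getElem _ _ hj0 (by simp only [List.length_map]; omega),
            PySem.List.pyGetD_eq_getElem _ _ hj0 (by omega)]
        simp
      simp only [hmget, hjget]
      congr 1
      rw [PySem.Dict.foldl_insert_getD_add_one_eq_counter, PySem.Dict.foldl_insert_getD_add_one_eq_counter,
          PySem.Dict.keys_counter, pv_value_eq y (PySem.List.pyGetD xs j []),
          PySem.List.foldl_add]
      simp only [PySem.Dict.getD_counter, zero_add]
    rw [hstep]
    exact ih (m + 1) _ (by exact_mod_cast hdrop')

-- ===== VERDICT (by name: the statement is the Claim_ definition above) =====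
theorem calc_incompatibilities_spec : Claim_equal_calc_incompatibilities := by
  intro xs _
  show calc_incompatibilities xs = calc_incompatibilities_alt xs
  unfold calc_incompatibilities calc_incompatibilities_alt
  have h := pv_outer xs xs 0 PySem.Dict.empty (by simp)
  simp only [Nat.cast_zero] at h
  rw [h]
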